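-- pv_equiv track=rewrite | github.com/pypi-data/pypi-mirror-293 | packages/esac-juice-pyutils/esac_juice_pyutils-0.3.2-py3-none-any.whl/esac_juice_pyutils/periods/intervals_handler.py | intervals_clean
-- ===== SOURCE A (Python) =====
-- def intervals_clean(intervals, max_gap=0, min_interval=0):
--     """
--     Clean a list of intervals removing intervals <= min_interval and if gaps < max_gap join intervals
--
--     :param intervals: list of interval
--     :param max_gap: The maximum acceptable gap between values;
--     Consecutive values with Intervals smaller than max_gaps will be combined into a single interval.
--     Default: 0   (any gap keeps intervals separate)
--     :param min_interval: The smallest acceptable interval;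
--     Any interval smaller is discarded; Default: 0   (all intervals are accepted)
--     :return: list of intervals [[start0, end0]...] values without gaps > max_gap and (end_i - stat_i) > min_interval
--     """
--
--     import copy
--     list_of_intervals = copy.deepcopy(intervals)
--
--     n = len(list_of_intervals) - 1
--     for i in range(n, 0, -1):
--         if list_of_intervals[i][0] - list_of_intervals[i - 1][1] < max_gap:
--             list_of_intervals[i - 1] = [list_of_intervals[i - 1][0], list_of_intervals[i][1]]
--             list_of_intervals.pop(i)
--
--     list_of_intervals = [interval for interval in list_of_intervals if (interval[1] - interval[0]) > min_interval]
--
--     return list_of_intervals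
-- ===== SOURCE B (Python) =====
-- def intervals_clean(intervals, max_gap=0, min_interval=0):
--     merged = []
--     cur = None
--     for iv in intervals:
--         if cur is None:
--             cur = iv
--         elif iv[0] - cur[1] < max_gap:
--             cur = [cur[0], iv[1]]
--         else:
--             merged.append(cur)
--             cur = iv
--     if cur is not None:
--         merged.append(cur)
--     return [iv for iv in merged if iv[1] - iv[0] > min_interval]
-- ===== Notes on version B (the rewrite author's own statement) =====
-- stated objective: faster
-- what changed: Replaces the backward index loop with repeated list.pop (O(n) per pop) and a deepcopy by a single forward pass that accumulates the current merged interval and builds the output list once.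
import Mathlib
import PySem

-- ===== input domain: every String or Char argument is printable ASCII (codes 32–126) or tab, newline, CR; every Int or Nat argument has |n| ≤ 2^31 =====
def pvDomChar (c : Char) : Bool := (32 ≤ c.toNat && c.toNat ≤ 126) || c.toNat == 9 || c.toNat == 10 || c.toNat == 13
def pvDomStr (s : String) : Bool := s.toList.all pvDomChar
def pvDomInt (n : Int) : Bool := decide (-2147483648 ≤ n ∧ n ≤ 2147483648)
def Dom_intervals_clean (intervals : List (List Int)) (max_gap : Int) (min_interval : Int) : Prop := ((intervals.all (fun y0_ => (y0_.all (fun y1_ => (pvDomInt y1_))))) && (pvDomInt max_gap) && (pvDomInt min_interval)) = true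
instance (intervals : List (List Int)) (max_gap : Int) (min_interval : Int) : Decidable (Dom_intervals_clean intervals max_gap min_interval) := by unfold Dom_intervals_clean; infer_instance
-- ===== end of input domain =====

-- B replaces A's backward loop with repeated list.pop (plus a deepcopy) by one forward merging
-- pass (return-value equivalence; B's result may share sublist objects with the input where A deep-copies).

-- ===== PORT A =====
-- l[j] on an inner interval; exact on Pre_ (every sublist has length >= 2, indices 0/1 in range)
def pvItem (l : List Int) (j : Nat) : Int := l.getD j 0

-- xs[i][j]; exact on Pre_ (loop indices are always in range)
def pvGet2 (l : List (List Int)) (i : Nat) (j : Nat) : Int := pvItem (l.getD i []) j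

-- one iteration of A's backward loop body at index i
def pvAStep (max_gap : Int) (xs : List (List Int)) (i : Nat) : List (List Int) :=
  if pvGet2 xs i 0 - pvGet2 xs (i - 1) 1 < max_gap then
    (xs.set (i - 1) [pvGet2 xs (i - 1) 0, pvGet2 xs i 1]).eraseIdx i
  else xs

-- 'for i in range(n, 0, -1)': process index i, then recurse on i-1
def pvALoop (max_gap : Int) (xs : List (List Int)) : Nat → List (List Int)
  | 0 => xs
  | i + 1 => pvALoop max_gap (pvAStep max_gap xs (i + 1)) i

def intervals_clean (intervals : List (List Int)) (max_gap : Int) (min_interval : Int) : List (List Int) :=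
  (pvALoop max_gap intervals (intervals.length - 1)).filter
    (fun iv => decide (pvItem iv 1 - pvItem iv 0 > min_interval))

-- ===== PORT B =====
-- Source B's forward pass: cur is the interval being accumulated, rest the remaining input
def pvBLoop (max_gap : Int) (cur : List Int) : List (List Int) → List (List Int)
  | [] => [cur]
  | iv :: rest =>
    if pvItem iv 0 - pvItem cur 1 < max_gap then
      pvBLoop max_gap [pvItem cur 0, pvItem iv 1] rest
    else
      cur :: pvBLoop max_gap iv rest

def intervals_clean_alt (intervals : List (List Int)) (max_gap : Int) (min_interval : Int) : List (List Int) :=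
  match intervals with
  | [] => []
  | iv :: rest =>
    (pvBLoop max_gap iv rest).filter
      (fun iv => decide (pvItem iv 1 - pvItem iv 0 > min_interval))

-- ===== PRECONDITION & SPEC =====
-- A raises IndexError (sublist[0]/sublist[1]) when some sublist has fewer than 2 elements;
-- Pre_ excludes exactly those inputs.
def Pre_intervals_clean (intervals : List (List Int)) (max_gap : Int) (min_interval : Int) : Prop :=
  ∀ iv ∈ intervals, 2 ≤ iv.length
instance (intervals : List (List Int)) (max_gap : Int) (min_interval : Int) : Decidable (Pre_intervals_clean intervals max_gap min_interval) := by unfold Pre_intervals_clean; infer_instance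

def pvWitness_intervals_clean : List (List Int) × Int × Int := ([[0, 1], [3, 9]], 1, 0)

def Spec_intervals_clean (intervals : List (List Int)) (max_gap : Int) (min_interval : Int) (out : List (List Int)) : Prop := out = intervals_clean_alt intervals max_gap min_interval
instance (intervals : List (List Int)) (max_gap : Int) (min_interval : Int) (out : List (List Int)) : Decidable (Spec_intervals_clean intervals max_gap min_interval out) := by unfold Spec_intervals_clean; infer_instance

-- ===== CLAIM (what is proved, stated in full; the proofs are below) =====
def Claim_equal_intervals_clean : Prop := ∀ (intervals : List (List Int)) (max_gap : Int) (min_interval : Int), Dom_intervals_clean intervals max_gap min_interval → Pre_intervals_clean intervals max_gap min_interval → Spec_intervals_clean intervals max_gap min_interval (intervals_clean intervals max_gap min_interval)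

-- ===== LEMMAS AND PROOFS =====

-- canonical right-fold form of "merge adjacent intervals whose gap is < max_gap"
def pvMergeStep (max_gap : Int) (a : List Int) (l : List (List Int)) : List (List Int) :=
  match l with
  | [] => [a]
  | h :: t => if pvItem h 0 - pvItem a 1 < max_gap then [pvItem a 0, pvItem h 1] :: t else a :: l

def pvFMerge (max_gap : Int) : List (List Int) → List (List Int)
  | [] => []
  | a :: ys => pvMergeStep max_gap a (pvFMerge max_gap ys)

theorem pvItem_pair0 (x y : Int) : pvItem [x, y] 0 = x := rfl
theorem pvItem_pair1 (x y : Int) : pvItem [x, y] 1 = y := rfl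

theorem pvBLoop_eq_mergeStep (max_gap : Int) (rest : List (List Int)) :
    ∀ cur, pvBLoop max_gap cur rest = pvMergeStep max_gap cur (pvFMerge max_gap rest) := by
  induction rest with
  | nil => intro cur; rfl
  | cons y rest ih =>
    intro cur
    have hy : pvFMerge max_gap (y :: rest) = pvMergeStep max_gap y (pvFMerge max_gap rest) := by
      rw [pvFMerge]
    rw [pvBLoop, ih, ih, hy]
    cases hr : pvFMerge max_gap rest with
    | nil =>
      by_cases h1 : pvItem y 0 - pvItem cur 1 < max_gap <;>
        simp [pvMergeStep, h1]
    | cons h t =>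
      by_cases h1 : pvItem y 0 - pvItem cur 1 < max_gap <;>
      by_cases h2 : pvItem h 0 - pvItem y 1 < max_gap <;>
        simp [pvMergeStep, pvItem_pair0, pvItem_pair1, h1, h2]

theorem pvAStep_cons_shift (max_gap : Int) (a : List Int) (ys : List (List Int)) (i : Nat) :
    pvAStep max_gap (a :: ys) (i + 2) = a :: pvAStep max_gap ys (i + 1) := by
  have g0 : pvGet2 (a :: ys) (i + 2) 0 = pvGet2 ys (i + 1) 0 := rfl
  have g1 : pvGet2 (a :: ys) ((i + 2) - 1) 1 = pvGet2 ys ((i + 1) - 1) 1 := rfl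
  have g2 : pvGet2 (a :: ys) ((i + 2) - 1) 0 = pvGet2 ys ((i + 1) - 1) 0 := rfl
  have g3 : pvGet2 (a :: ys) (i + 2) 1 = pvGet2 ys (i + 1) 1 := rfl
  have s1 : ∀ v, (a :: ys).set ((i + 2) - 1) v = a :: ys.set ((i + 1) - 1) v := fun v => rfl
  have e1 : ∀ l : List (List Int), (a :: l).eraseIdx (i + 2) = a :: l.eraseIdx (i + 1) :=
    fun l => rfl
  simp only [pvAStep, g0, g1, g2, g3, s1, e1]
  split_ifs <;> rfl

theorem pvALoop_cons (max_gap : Int) (a : List Int) (ys : List (List Int)) :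
    ∀ m, pvALoop max_gap (a :: ys) (m + 1) =
      pvAStep max_gap (a :: pvALoop max_gap ys m) 1 := by
  intro m
  induction m generalizing ys with
  | zero => rfl
  | succ m ih =>
    show pvALoop max_gap (pvAStep max_gap (a :: ys) (m + 2)) (m + 1) = _
    rw [pvAStep_cons_shift, ih]
    rfl

theorem pvMergeStep_ne_nil (max_gap : Int) (a : List Int) (l : List (List Int)) :
    pvMergeStep max_gap a l ≠ [] := by
  cases l with
  | nil => simp [pvMergeStep]
  | cons h t => simp only [pvMergeStep]; split_ifs <;> simp

theorem pvAStep_one (max_gap : Int) (a h : List Int) (t : List (List Int)) :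
    pvAStep max_gap (a :: h :: t) 1 = pvMergeStep max_gap a (h :: t) := by
  have e1 : pvGet2 (a :: h :: t) 1 0 = pvItem h 0 := rfl
  have e2 : pvGet2 (a :: h :: t) (1 - 1) 1 = pvItem a 1 := rfl
  have e3 : pvGet2 (a :: h :: t) (1 - 1) 0 = pvItem a 0 := rfl
  have e4 : pvGet2 (a :: h :: t) 1 1 = pvItem h 1 := rfl
  have s1 : ∀ v, ((a :: h :: t).set (1 - 1) v).eraseIdx 1 = v :: t := fun v => rfl
  simp only [pvAStep, pvMergeStep, e1, e2, e3, e4, s1]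

theorem pvALoop_eq_fMerge (max_gap : Int) (xs : List (List Int)) :
    pvALoop max_gap xs (xs.length - 1) = pvFMerge max_gap xs := by
  induction xs with
  | nil => rfl
  | cons a ys ih =>
    cases ys with
    | nil => rfl
    | cons y t =>
      have hlen : (a :: y :: t).length - 1 = ((y :: t).length - 1) + 1 := by simp
      rw [hlen, pvALoop_cons, ih]
      cases hm : pvFMerge max_gap (y :: t) with
      | nil =>
        rw [pvFMerge] at hm
        exact absurd hm (pvMergeStep_ne_nil _ _ _)
      | cons h2 t2 =>
        have hfm : pvFMerge max_gap (a :: y :: t) =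
            pvMergeStep max_gap a (pvFMerge max_gap (y :: t)) := by rw [pvFMerge]
        rw [pvAStep_one, hfm, hm]

-- ===== VERDICT (by name: the statement is the Claim_ definition above) =====
theorem intervals_clean_spec : Claim_equal_intervals_clean := by
  intro intervals max_gap min_interval _ _
  unfold Spec_intervals_clean intervals_clean
  rw [pvALoop_eq_fMerge]
  cases intervals with
  | nil => rfl
  | cons a rest =>
    have hb : intervals_clean_alt (a :: rest) max_gap min_interval =
        List.filter (fun iv => decide (pvItem iv 1 - pvItem iv 0 > min_interval))
          (pvBLoop max_gap a rest) := rfl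
    rw [hb, pvBLoop_eq_mergeStep, pvFMerge]
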